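-- pv_equiv track=rewrite | github.com/Ignatiusboadi/Topological-Trees | topological_trees.py | c_d_h
-- ===== SOURCE A (Python) =====
-- def c_d_h(d, h):
--     ini_v = ['0' + str(h)]                      # creating the root
--     fin_edges = []                              # where all the edges created will be stored
--     for i in range(1, h + 1):                   # counting down the height of the tree from level 1 to level h
--         new_vs = list(range(d**i))                     # creating all vertices at level i.
--         new_v = []                                     # temporary storage of all vertices at level i.
--         for n,j in enumerate(ini_v):                   # iterating over vertices at level i-1.
--             for k in new_vs[n*d:(n + 1)*d]:            # iterating over the nth d vertices at level i.
--                 new_v.append(str(i) + str(k))          # naming vertices at level i.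
--                 fin_edges.append((j, str(i) + str(k))) # creating edges between the nth vertex at level i-1 and
--                                                        # nth d vertices at level i.
--         ini_v = new_v           # vertices at level i now becomes the vertices at level i-1 and we proceed to the next level.
--     return fin_edges
-- ===== SOURCE B (Python) =====
-- def c_d_h(d, h):
--     if d <= 0:
--         return []
--
--     def parent(i, k):
--         return '0' + str(h) if i == 1 else str(i - 1) + str(k // d)
--
--     return [(parent(i, k), str(i) + str(k))
--             for i in range(1, h + 1)
--             for k in range(d ** i)]
-- ===== Notes on version B (the rewrite author's own statement) =====
-- stated objective: simpler
-- what changed: Replaces the frontier-tracking level-by-level construction (maintained ini_v list, per-parent slicing of the level's vertex range) with a direct double comprehension that derives each edge's parent arithmetically as k // d (root named specially at level 1).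
import Mathlib
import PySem

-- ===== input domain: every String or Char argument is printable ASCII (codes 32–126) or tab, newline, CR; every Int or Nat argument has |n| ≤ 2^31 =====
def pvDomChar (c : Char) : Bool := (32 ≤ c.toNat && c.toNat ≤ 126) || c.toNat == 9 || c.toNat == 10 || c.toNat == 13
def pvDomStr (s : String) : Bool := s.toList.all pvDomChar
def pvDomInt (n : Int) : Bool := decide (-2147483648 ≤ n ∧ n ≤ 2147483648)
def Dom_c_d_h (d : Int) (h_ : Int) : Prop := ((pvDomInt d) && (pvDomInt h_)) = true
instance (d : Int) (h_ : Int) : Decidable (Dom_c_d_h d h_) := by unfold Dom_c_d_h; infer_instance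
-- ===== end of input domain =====

-- B replaces A's frontier-tracking level-by-level construction (a maintained list of previous-level
-- names, sliced per parent) by a direct double comprehension that computes each edge's parent
-- arithmetically as k // d: simpler, no frontier list and no slicing.

-- ===== PORT A =====
-- body of 'for k in new_vs[n*d:(n+1)*d]' folded over the slice; state st2/st3 = (new_v, fin_edges)
def aInner (new_vs : List Int) (d : Int) (i : Int)
    (st2 : List String × List (String × String)) (nj : Int × String) :
    List String × List (String × String) :=
  (PySem.List.slice new_vs (some (nj.1 * d)) (some ((nj.1 + 1) * d))).foldl
    (fun st3 k =>
      (st3.1 ++ [PySem.Int.toStr i ++ PySem.Int.toStr k],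
       st3.2 ++ [(nj.2, PySem.Int.toStr i ++ PySem.Int.toStr k)]))
    st2

-- one iteration of 'for i in range(1, h+1)'; state st = (ini_v, fin_edges)
def aLevel (d : Int) (st : List String × List (String × String)) (i : Int) :
    List String × List (String × String) :=
  (PySem.List.enumerate st.1).foldl
    (aInner (PySem.List.pyRange 0 (d ^ i.toNat) 1) d i) ([], st.2)

def c_d_h (d : Int) (h_ : Int) : List (String × String) :=
  ((PySem.List.pyRange 1 (h_ + 1) 1).foldl (aLevel d)
      (["0" ++ PySem.Int.toStr h_], [])).2

-- ===== PORT B =====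
def altParent (d : Int) (h_ : Int) (i : Int) (k : Int) : String :=
  if i = 1 then "0" ++ PySem.Int.toStr h_
  else PySem.Int.toStr (i - 1) ++ PySem.Int.toStr (PySem.Int.floordiv k d)

def c_d_h_alt (d : Int) (h_ : Int) : List (String × String) :=
  if d ≤ 0 then []
  else
    (PySem.List.pyRange 1 (h_ + 1) 1).flatMap (fun i =>
      (PySem.List.pyRange 0 (d ^ i.toNat) 1).map (fun k =>
        (altParent d h_ i k, PySem.Int.toStr i ++ PySem.Int.toStr k)))

-- ===== PRECONDITION & SPEC =====
def Spec_c_d_h (d : Int) (h_ : Int) (out : List (String × String)) : Prop := out = c_d_h_alt d h_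
instance (d : Int) (h_ : Int) (out : List (String × String)) : Decidable (Spec_c_d_h d h_ out) := by unfold Spec_c_d_h; infer_instance

-- ===== CLAIM (what is proved, stated in full; the proofs are below) =====
def Claim_equal_c_d_h : Prop := ∀ (d : Int) (h_ : Int), Dom_c_d_h d h_ → Spec_c_d_h d h_ (c_d_h d h_)

-- ===== LEMMAS AND PROOFS =====

-- a fold that appends one element to each pair component is a pair of maps
theorem foldl_pair_append {α : Type} (L : List α) (g : α → String) (e : α → String × String)
    (x : List String) (y : List (String × String)) :
    L.foldl (fun st k => (st.1 ++ [g k], st.2 ++ [e k])) (x, y) = (x ++ L.map g, y ++ L.map e) := by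
  induction L generalizing x y with
  | nil => simp
  | cons a L ih => simp [List.foldl_cons, ih]

-- slicing a range at in-range bounds is a sub-range
theorem slice_pyRange (M a b : Int) (ha : 0 ≤ a) (hab : a ≤ b) (hbM : b ≤ M) :
    PySem.List.slice (PySem.List.pyRange 0 M 1) (some a) (some b) = PySem.List.pyRange a b 1 := by
  rw [PySem.List.slice_toNat _ ha (le_trans ha hab)]
  apply List.ext_getElem
  · simp [PySem.List.length_pyRange_one]
    omega
  · intro k h1 h2
    simp only [List.getElem_take, List.getElem_drop, PySem.List.getElem_pyRange_one]
    have hk : k < (b - a).toNat := by simpa [PySem.List.length_pyRange_one] using h2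
    have : (a.toNat : Int) = a := Int.toNat_of_nonneg ha
    omega

theorem floordiv_interval (d m k : Int) (hd : 0 < d) (h1 : m * d ≤ k) (h2 : k < (m + 1) * d) :
    PySem.Int.floordiv k d = m := by
  have h0 : 0 ≤ k - m * d := by omega
  have hlt : k - m * d < d := by nlinarith
  have hk : k = (k - m * d) + m * d := by ring
  rw [PySem.Int.floordiv, Int.fdiv_eq_ediv, hk,
    Int.add_mul_ediv_right _ _ (by omega : d ≠ 0),
    Int.ediv_eq_zero_of_lt h0 hlt]
  simp [hd.le]

-- levels after an empty frontier produce nothing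
theorem foldl_aLevel_nil (d : Int) (L : List Int) (acc : List (String × String)) :
    L.foldl (aLevel d) ([], acc) = ([], acc) := by
  induction L with
  | nil => rfl
  | cons a L ih => simpa [aLevel, PySem.List.enumerate] using ih

theorem pow_toNat_cast (d : Int) (hd : 0 < d) (a : Int) :
    ((d.toNat ^ a.toNat : Nat) : Int) = d ^ a.toNat := by
  push_cast [Int.toNat_of_nonneg hd.le]
  rfl

-- one level of A, starting from a frontier that is a map over a range
theorem aLevel_inner (d : Int) (hd : 0 < d) (m : Nat) (f : Int → String) (M i : Int)
    (nv0 : List String) (acc : List (String × String)) (hM : (m : Int) * d ≤ M) :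
    (PySem.List.enumerate ((PySem.List.pyRange 0 (m : Int) 1).map f) 0).foldl
        (aInner (PySem.List.pyRange 0 M 1) d i) (nv0, acc)
      = (nv0 ++ (PySem.List.pyRange 0 ((m : Int) * d) 1).map
            (fun k => PySem.Int.toStr i ++ PySem.Int.toStr k),
         acc ++ (PySem.List.pyRange 0 ((m : Int) * d) 1).map
            (fun k => (f (PySem.Int.floordiv k d), PySem.Int.toStr i ++ PySem.Int.toStr k))) := by
  induction m generalizing nv0 acc with
  | zero => simp [PySem.List.pyRange_one_eq_nil]
  | succ m ih =>
    have hcast : ((m + 1 : Nat) : Int) = (m : Int) + 1 := by push_cast; ring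
    rw [hcast, PySem.List.pyRange_one_succ_right (by positivity), List.map_append,
      PySem.List.enumerate_append, List.foldl_append]
    have hM' : (m : Int) * d ≤ M := by nlinarith
    rw [ih nv0 acc hM']
    have hlen : (((PySem.List.pyRange 0 (m : Int) 1).map f).length : Int) = (m : Int) := by
      simp [PySem.List.length_pyRange_one]
    simp only [List.map_cons, List.map_nil, PySem.List.enumerate_cons, PySem.List.enumerate_nil,
      List.foldl_cons, List.foldl_nil, zero_add, hlen]
    rw [aInner]
    simp only []
    rw [slice_pyRange M ((m : Int) * d) (((m : Int) + 1) * d) (by positivity) (by nlinarith)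
      (by rwa [hcast] at hM)]
    rw [foldl_pair_append]
    rw [PySem.List.pyRange_one_append 0 ((m : Int) * d) (((m : Int) + 1) * d) (by positivity)
      (by nlinarith)]
    simp only [List.map_append, List.append_assoc]
    have : (PySem.List.pyRange ((m : Int) * d) (((m : Int) + 1) * d) 1).map
        (fun k => (f (PySem.Int.floordiv k d), PySem.Int.toStr i ++ PySem.Int.toStr k))
        = (PySem.List.pyRange ((m : Int) * d) (((m : Int) + 1) * d) 1).map
        (fun k => (f (m : Int), PySem.Int.toStr i ++ PySem.Int.toStr k)) := by
      apply List.map_congr_left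
      intro k hk
      rw [PySem.List.mem_pyRange_one] at hk
      rw [floordiv_interval d (m : Int) k hd hk.1 hk.2]
    rw [this]

-- the outer loop from level a+1 on, with frontier = the names of level a
theorem aLevels_from (d : Int) (hd : 0 < d) (h_ : Int) (n : Nat) :
    ∀ (a : Int) (acc : List (String × String)), 1 ≤ a →
    ((PySem.List.pyRange (a + 1) (a + 1 + (n : Int)) 1).foldl (aLevel d)
        ((PySem.List.pyRange 0 (d ^ a.toNat) 1).map
          (fun k => PySem.Int.toStr a ++ PySem.Int.toStr k), acc)).2
      = acc ++ (PySem.List.pyRange (a + 1) (a + 1 + (n : Int)) 1).flatMap (fun i =>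
          (PySem.List.pyRange 0 (d ^ i.toNat) 1).map (fun k =>
            (altParent d h_ i k, PySem.Int.toStr i ++ PySem.Int.toStr k))) := by
  induction n with
  | zero =>
    intro a acc ha
    simp
  | succ n ih =>
    intro a acc ha
    have hcons : PySem.List.pyRange (a + 1) (a + 1 + ((n + 1 : Nat) : Int)) 1
        = (a + 1) :: PySem.List.pyRange (a + 2) (a + 1 + ((n + 1 : Nat) : Int)) 1 := by
      have := PySem.List.pyRange_one_cons (a := a + 1) (b := a + 1 + ((n + 1 : Nat) : Int))
        (by push_cast; omega)
      simpa [add_assoc] using this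
    rw [hcons, List.foldl_cons, List.flatMap_cons]
    have hm : ((d.toNat ^ a.toNat : Nat) : Int) = d ^ a.toNat := pow_toNat_cast d hd a
    have hstep : aLevel d ((PySem.List.pyRange 0 (d ^ a.toNat) 1).map
          (fun k => PySem.Int.toStr a ++ PySem.Int.toStr k), acc) (a + 1)
        = ((PySem.List.pyRange 0 (d ^ (a+1).toNat) 1).map
            (fun k => PySem.Int.toStr (a+1) ++ PySem.Int.toStr k),
           acc ++ (PySem.List.pyRange 0 (d ^ (a+1).toNat) 1).map (fun k =>
            (altParent d h_ (a+1) k, PySem.Int.toStr (a+1) ++ PySem.Int.toStr k))) := by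
      rw [aLevel]
      simp only []
      have hpow : ((d.toNat ^ a.toNat : Nat) : Int) * d = d ^ (a + 1).toNat := by
        rw [hm]
        have : (a + 1).toNat = a.toNat + 1 := by omega
        rw [this, pow_succ]
      rw [← hm]
      rw [aLevel_inner d hd (d.toNat ^ a.toNat)
        (fun k => PySem.Int.toStr a ++ PySem.Int.toStr k) (d ^ (a+1).toNat) (a+1) [] acc
        (le_of_eq hpow)]
      rw [hpow]
      simp only [List.nil_append]
      congr 1
      congr 1
      apply List.map_congr_left
      intro k hk
      have : altParent d h_ (a+1) k
          = PySem.Int.toStr a ++ PySem.Int.toStr (PySem.Int.floordiv k d) := by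
        rw [altParent]
        rw [if_neg (by omega : ¬ (a + 1 = 1))]
        norm_num
      rw [this]
    rw [hstep]
    have := ih (a + 1) (acc ++ (PySem.List.pyRange 0 (d ^ (a+1).toNat) 1).map (fun k =>
            (altParent d h_ (a+1) k, PySem.Int.toStr (a+1) ++ PySem.Int.toStr k))) (by omega)
    have harith : a + 1 + 1 + (n : Int) = a + 1 + ((n + 1 : Nat) : Int) := by push_cast; ring
    rw [harith] at this
    have h2 : a + 1 + 1 = a + 2 := by ring
    rw [h2] at this
    rw [this, List.append_assoc]

-- level 1 of A: frontier is the single root vertex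
theorem aLevel_one (d h_ : Int) (hd : 0 < d) :
    aLevel d (["0" ++ PySem.Int.toStr h_], []) 1
      = ((PySem.List.pyRange 0 (d ^ (1:Int).toNat) 1).map
            (fun k => PySem.Int.toStr 1 ++ PySem.Int.toStr k),
         (PySem.List.pyRange 0 (d ^ (1:Int).toNat) 1).map
            (fun k => ("0" ++ PySem.Int.toStr h_, PySem.Int.toStr 1 ++ PySem.Int.toStr k))) := by
  rw [aLevel]
  have hroot : ["0" ++ PySem.Int.toStr h_]
      = (PySem.List.pyRange 0 ((1:Nat):Int) 1).map (fun _ => "0" ++ PySem.Int.toStr h_) := by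
    norm_num [PySem.List.pyRange_one]
  have hM1 : ((1:Nat):Int) * d ≤ d ^ (1:Int).toNat := by norm_num
  rw [show (["0" ++ PySem.Int.toStr h_], ([] : List (String × String))).1
      = (PySem.List.pyRange 0 ((1:Nat):Int) 1).map (fun _ => "0" ++ PySem.Int.toStr h_) from hroot]
  rw [aLevel_inner d hd 1 (fun _ => "0" ++ PySem.Int.toStr h_) (d ^ (1:Int).toNat) 1 [] [] hM1]
  norm_num

theorem c_d_h_eq_alt (d h_ : Int) : c_d_h d h_ = c_d_h_alt d h_ := by
  by_cases hd : d ≤ 0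
  · rw [c_d_h_alt, if_pos hd, c_d_h]
    by_cases hh : h_ + 1 ≤ 1
    · rw [PySem.List.pyRange_one_eq_nil hh]
      rfl
    · rw [PySem.List.pyRange_one_cons (by omega), List.foldl_cons]
      have h1 : aLevel d (["0" ++ PySem.Int.toStr h_], []) 1 = ([], []) := by
        rw [aLevel]
        rw [show ((["0" ++ PySem.Int.toStr h_], ([] : List (String × String))).1)
            = ["0" ++ PySem.Int.toStr h_] from rfl]
        rw [PySem.List.enumerate_cons, PySem.List.enumerate_nil]
        simp only [List.foldl_cons, List.foldl_nil]
        rw [aInner]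
        rw [show d ^ (1:Int).toNat = d from by norm_num]
        rw [PySem.List.pyRange_one_eq_nil hd]
        simp [PySem.List.slice]
      rw [h1, foldl_aLevel_nil]
  · push Not at hd
    rw [c_d_h_alt, if_neg (by omega)]
    by_cases hh : h_ + 1 ≤ 1
    · rw [c_d_h, PySem.List.pyRange_one_eq_nil hh]
      rfl
    · rw [c_d_h, PySem.List.pyRange_one_cons (by omega), List.foldl_cons, List.flatMap_cons,
        aLevel_one d h_ hd]
      have hn : h_ + 1 = 1 + 1 + (((h_ - 1).toNat : Nat) : Int) := by omega
      rw [hn]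
      rw [aLevels_from d hd h_ (h_ - 1).toNat 1 _ le_rfl]
      congr 1

-- ===== VERDICT (by name: the statement is the Claim_ definition above) =====
theorem c_d_h_spec : Claim_equal_c_d_h := by
  intro d h_ _
  exact c_d_h_eq_alt d h_
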